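-- pv_equiv track=rewrite | github.com/kalolameet49/nester | utils.py | simple_nesting_layout
-- ===== SOURCE A (Python) =====
-- def simple_nesting_layout(
--     sheet_w,
--     sheet_h,
--     part_w,
--     part_h,
--     qty,
--     gap=10
-- ):
--
--     positions = []
--
--     cols = int(sheet_w // (part_w + gap))
--
--     rows = int(sheet_h // (part_h + gap))
--
--     max_parts = cols * rows
--
--     placed = min(qty, max_parts)
--
--     count = 0
--
--     for r in range(rows):
--
--         for c in range(cols):
--
--             if count >= placed:
--                 break
--
--             x = c * (part_w + gap)
--             y = r * (part_h + gap)
--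
--             positions.append((x, y))
--
--             count += 1
--
--     return positions, placed
-- ===== SOURCE B (Python) =====
-- def simple_nesting_layout(
--     sheet_w,
--     sheet_h,
--     part_w,
--     part_h,
--     qty,
--     gap=10
-- ):
--     pitch_x = part_w + gap
--     pitch_y = part_h + gap
--
--     cols = int(sheet_w // pitch_x)
--     rows = int(sheet_h // pitch_y)
--
--     placed = min(qty, cols * rows)
--
--     positions = [((i % cols) * pitch_x, (i // cols) * pitch_y)
--                  for i in range(placed)]
--
--     return positions, placed
-- ===== Notes on version B (the rewrite author's own statement) =====
-- stated objective: simpler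
-- what changed: The nested row/column loops with a counter and break are replaced by a single comprehension over range(placed) that derives each cell's row and column by divmod-style index arithmetic (i % cols, i // cols).
-- outside the precondition, e.g. on simple_nesting_layout(10, 10, 0, 0, 1, 0): A raises ZeroDivisionError, B raises ZeroDivisionError; on simple_nesting_layout(-10, -10, 10, 10, 1, 0): A returns ([], 1), B returns ([(0, 0)], 1)
import Mathlib
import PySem

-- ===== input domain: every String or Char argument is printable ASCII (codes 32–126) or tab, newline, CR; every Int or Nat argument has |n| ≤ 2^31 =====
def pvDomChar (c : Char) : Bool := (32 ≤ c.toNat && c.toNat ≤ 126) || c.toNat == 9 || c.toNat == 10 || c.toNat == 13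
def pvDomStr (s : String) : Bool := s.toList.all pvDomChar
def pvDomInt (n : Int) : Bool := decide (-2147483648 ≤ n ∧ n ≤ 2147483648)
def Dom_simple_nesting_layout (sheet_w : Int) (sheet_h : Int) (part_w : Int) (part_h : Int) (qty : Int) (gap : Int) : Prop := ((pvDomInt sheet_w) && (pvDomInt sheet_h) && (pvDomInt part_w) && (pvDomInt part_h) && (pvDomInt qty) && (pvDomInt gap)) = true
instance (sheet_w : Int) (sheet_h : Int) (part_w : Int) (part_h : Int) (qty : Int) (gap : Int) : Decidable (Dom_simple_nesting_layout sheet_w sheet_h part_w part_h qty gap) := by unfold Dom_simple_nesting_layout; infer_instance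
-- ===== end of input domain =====

-- B flattens A's nested row/column loops (counter + break) into one pass over range(placed)
-- with divmod index arithmetic; objective: simpler. Same return value on all of Pre_.

-- ===== PORT A =====
-- literal transliteration of A; the inner 'break' is rendered as the guard keeping the
-- state unchanged: once count ≥ placed, every remaining inner iteration breaks at once,
-- so no further element is appended — exactly Python's behaviour.
def simple_nesting_layout (sheet_w : Int) (sheet_h : Int) (part_w : Int) (part_h : Int) (qty : Int) (gap : Int) : (List (Int × Int)) × Int :=
  let positions : List (Int × Int) := []
  let cols := PySem.Int.floordiv sheet_w (part_w + gap)
  let rows := PySem.Int.floordiv sheet_h (part_h + gap)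
  let max_parts := cols * rows
  let placed := min qty max_parts
  let st :=
    (PySem.List.pyRange 0 rows 1).foldl (fun (s : List (Int × Int) × Int) r =>
      (PySem.List.pyRange 0 cols 1).foldl (fun (s : List (Int × Int) × Int) c =>
        if s.2 ≥ placed then s
        else (s.1 ++ [(c * (part_w + gap), r * (part_h + gap))], s.2 + 1)) s)
      (positions, 0)
  (st.1, placed)

-- ===== PORT B =====
def simple_nesting_layout_alt (sheet_w : Int) (sheet_h : Int) (part_w : Int) (part_h : Int) (qty : Int) (gap : Int) : (List (Int × Int)) × Int :=
  let pitch_x := part_w + gap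
  let pitch_y := part_h + gap
  let cols := PySem.Int.floordiv sheet_w pitch_x
  let rows := PySem.Int.floordiv sheet_h pitch_y
  let placed := min qty (cols * rows)
  let positions := (PySem.List.pyRange 0 placed 1).map
    (fun i => (PySem.Int.mod i cols * pitch_x, PySem.Int.floordiv i cols * pitch_y))
  (positions, placed)

-- ===== PRECONDITION & SPEC =====
-- Pre_ excludes the zero part pitches (Python A raises ZeroDivisionError there) and the
-- degenerate inputs where both the column and the row count are negative while qty > 0:
-- there A reports placed > 0 parts yet returns no positions (an accident of its empty
-- range loops) while B lays the parts out — both values are equally indefensible on a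
-- sheet of negative size, so the corner is excluded.
def Pre_simple_nesting_layout (sheet_w : Int) (sheet_h : Int) (part_w : Int) (part_h : Int) (qty : Int) (gap : Int) : Prop :=
  part_w + gap ≠ 0 ∧ part_h + gap ≠ 0 ∧
  ¬ (PySem.Int.floordiv sheet_w (part_w + gap) < 0 ∧
     PySem.Int.floordiv sheet_h (part_h + gap) < 0 ∧ 0 < qty)
instance (sheet_w : Int) (sheet_h : Int) (part_w : Int) (part_h : Int) (qty : Int) (gap : Int) : Decidable (Pre_simple_nesting_layout sheet_w sheet_h part_w part_h qty gap) := by unfold Pre_simple_nesting_layout; infer_instance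

def pvWitness_simple_nesting_layout : Int × Int × Int × Int × Int × Int := (100, 100, 10, 10, 4, 10)

def Spec_simple_nesting_layout (sheet_w : Int) (sheet_h : Int) (part_w : Int) (part_h : Int) (qty : Int) (gap : Int) (out : (List (Int × Int)) × Int) : Prop := out = simple_nesting_layout_alt sheet_w sheet_h part_w part_h qty gap
instance (sheet_w : Int) (sheet_h : Int) (part_w : Int) (part_h : Int) (qty : Int) (gap : Int) (out : (List (Int × Int)) × Int) : Decidable (Spec_simple_nesting_layout sheet_w sheet_h part_w part_h qty gap out) := by unfold Spec_simple_nesting_layout; infer_instance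

-- ===== CLAIM (what is proved, stated in full; the proofs are below) =====
def Claim_equal_simple_nesting_layout : Prop := ∀ (sheet_w : Int) (sheet_h : Int) (part_w : Int) (part_h : Int) (qty : Int) (gap : Int), Dom_simple_nesting_layout sheet_w sheet_h part_w part_h qty gap → Pre_simple_nesting_layout sheet_w sheet_h part_w part_h qty gap → Spec_simple_nesting_layout sheet_w sheet_h part_w part_h qty gap (simple_nesting_layout sheet_w sheet_h part_w part_h qty gap)

-- ===== LEMMAS AND PROOFS =====

-- A's inner loop over one row, with the counter in the state.
def pvInner (px py p rr : Int) (s : List (Int × Int) × Int) (c : Int) : List (Int × Int) × Int :=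
  if s.2 ≥ p then s else (s.1 ++ [(c * px, rr * py)], s.2 + 1)

-- What one row contributes, starting from count k: min n (p-k).toNat new cells.
theorem pvInner_spec (px py p rr : Int) (n : Nat) (pos : List (Int × Int)) (k : Int) :
    ((List.range n).map (fun j : Nat => (j : Int))).foldl (pvInner px py p rr) (pos, k)
    = (pos ++ (List.range (min n (p - k).toNat)).map (fun j : Nat => ((j : Int) * px, rr * py)),
       k + (min n (p - k).toNat : Nat)) := by
  induction n with
  | zero => simp
  | succ m ih =>
    rw [List.range_succ, List.map_append, List.foldl_append, ih]
    simp only [List.map_cons, List.map_nil, List.foldl_cons, List.foldl_nil, pvInner]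
    by_cases h : (k + (min m (p - k).toNat : Nat)) ≥ p
    · have h2 : min (m + 1) (p - k).toNat = min m (p - k).toNat := by omega
      rw [h2, if_pos h]
    · have h1 : m < (p - k).toNat := by omega
      have h2 : min (m + 1) (p - k).toNat = m + 1 := by omega
      have h3 : min m (p - k).toNat = m := by omega
      rw [h2, h3]
      rw [if_neg (by omega : ¬ (k + (m : Int) ≥ p))]
      rw [List.range_succ, List.map_append, List.append_assoc]
      rw [Prod.mk.injEq]
      constructor
      · simp
      · push_cast; ring

theorem pvInner_foldl (px py p rr cols : Int) (pos : List (Int × Int)) (k : Int) :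
    (PySem.List.pyRange 0 cols 1).foldl (pvInner px py p rr) (pos, k)
    = (pos ++ (List.range (min cols.toNat (p - k).toNat)).map (fun j : Nat => ((j : Int) * px, rr * py)),
       k + (min cols.toNat (p - k).toNat : Nat)) := by
  have h0 : PySem.List.pyRange 0 cols 1 = (List.range cols.toNat).map (fun j : Nat => (j : Int)) := by
    rw [PySem.List.pyRange_one]
    simp
  rw [h0, pvInner_spec]

-- A's outer loop, when cols > 0 and 0 ≤ p ≤ cols * rows: after all R rows the
-- positions are the divmod layout of the first min (R*C) p.toNat indices.
theorem pvOuter_spec (px py p : Int) (C : Nat) (hC : 0 < C) (R : Nat) (hp : 0 ≤ p) :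
    ((List.range R).map (fun j : Nat => (j : Int))).foldl
        (fun s rr => (PySem.List.pyRange 0 (C : Int) 1).foldl (pvInner px py p rr) s) ([], 0)
    = ((List.range (min (R * C) p.toNat)).map
         (fun i : Nat => (((i % C : Nat) : Int) * px, ((i / C : Nat) : Int) * py)),
       ((min (R * C) p.toNat : Nat) : Int)) := by
  induction R with
  | zero => simp
  | succ m ih =>
    rw [List.range_succ, List.map_append, List.foldl_append, ih]
    simp only [List.map_cons, List.map_nil, List.foldl_cons, List.foldl_nil]
    rw [pvInner_foldl]
    have hCt : (C : Int).toNat = C := by simp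
    by_cases hfull : m * C ≤ p.toNat
    · -- count so far is m*C; this row adds min C (p.toNat - m*C) cells
      have hmin : min (m * C) p.toNat = m * C := by omega
      have harg : (p - (min (m * C) p.toNat : Nat)).toNat = p.toNat - m * C := by
        rw [hmin]; omega
      have hseg : min (C : Int).toNat (p - (min (m * C) p.toNat : Nat)).toNat
          = min C (p.toNat - m * C) := by rw [hCt, harg]
      rw [hseg]
      have htot : min ((m + 1) * C) p.toNat = m * C + min C (p.toNat - m * C) := by
        rw [Nat.succ_mul]; omega
      rw [hmin, htot, List.range_add, List.map_append, List.map_map]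
      rw [Prod.mk.injEq]
      constructor
      · congr 1
        apply List.map_congr_left
        intro j hj
        simp only [List.mem_range] at hj
        simp only [Function.comp]
        have hjC : j < C := by omega
        have h1 : (m * C + j) % C = j := by
          rw [Nat.add_comm, Nat.add_mul_mod_self_right]
          exact Nat.mod_eq_of_lt hjC
        have h2 : (m * C + j) / C = m := by
          rw [Nat.mul_comm m C, Nat.mul_add_div hC, Nat.div_eq_of_lt hjC]
          omega
        rw [h1, h2]
      · push_cast; ring
    · -- count already reached p: nothing appended
      have hmin : min (m * C) p.toNat = p.toNat := by omega
      have harg : (p - (min (m * C) p.toNat : Nat)).toNat = 0 := by rw [hmin]; omega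
      have hseg : min (C : Int).toNat (p - (min (m * C) p.toNat : Nat)).toNat = 0 := by
        rw [harg]; omega
      have htot : min ((m + 1) * C) p.toNat = p.toNat := by
        have : (m+1)*C = m*C + C := by ring
        omega
      rw [hseg, htot, hmin]
      simp

-- ===== VERDICT (by name: the statement is the Claim_ definition above) =====
theorem simple_nesting_layout_spec : Claim_equal_simple_nesting_layout := by
  intro sheet_w sheet_h part_w part_h qty gap _ hpre
  obtain ⟨hpx, hpy, hneg⟩ := hpre
  unfold Spec_simple_nesting_layout simple_nesting_layout simple_nesting_layout_alt
  simp only []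
  set px := part_w + gap with hpxdef
  set py := part_h + gap with hpydef
  set c := PySem.Int.floordiv sheet_w px with hc
  set r := PySem.Int.floordiv sheet_h py with hr
  set p := min qty (c * r) with hpdef
  -- two cases: nothing is placed, or c > 0 ∧ r > 0
  by_cases hp : p ≤ 0
  · -- both sides produce no positions
    have hrange : PySem.List.pyRange 0 p 1 = [] := by
      rw [PySem.List.pyRange_one]
      have : (p - 0).toNat = 0 := by omega
      rw [this]; simp
    have hA : ∀ (l : List Int) (s : List (Int × Int) × Int), s.2 ≥ p →
        l.foldl (fun s rr => (PySem.List.pyRange 0 c 1).foldl (pvInner px py p rr) s) s = s := by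
      intro l
      induction l with
      | nil => intro s _; rfl
      | cons x xs ih =>
        intro s hs
        simp only [List.foldl_cons]
        have hinner : ∀ (l2 : List Int) (s2 : List (Int × Int) × Int), s2.2 ≥ p →
            l2.foldl (pvInner px py p x) s2 = s2 := by
          intro l2
          induction l2 with
          | nil => intro s2 _; rfl
          | cons y ys ih2 =>
            intro s2 hs2
            simp only [List.foldl_cons, pvInner, if_pos hs2]
            exact ih2 s2 hs2
        rw [hinner _ s hs]
        exact ih s hs
    rw [hrange]
    have := hA (PySem.List.pyRange 0 r 1) ([], 0) (by simpa using hp)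
    simp only at this ⊢
    rw [show (fun (s : List (Int × Int) × Int) (rr : Int) =>
          (PySem.List.pyRange 0 c 1).foldl (fun s c' =>
            if s.2 ≥ p then s else (s.1 ++ [(c' * px, rr * py)], s.2 + 1)) s)
        = (fun s rr => (PySem.List.pyRange 0 c 1).foldl (pvInner px py p rr) s) from rfl]
    rw [this]
    simp
  · -- p > 0: then c * r ≥ p > 0, and Pre_ rules out c < 0 ∧ r < 0, so c > 0 ∧ r > 0
    replace hp : 0 < p := by omega
    have hcr : 0 < c * r := lt_of_lt_of_le hp (by rw [hpdef]; exact min_le_right _ _)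
    have hq : 0 < qty := lt_of_lt_of_le hp (by rw [hpdef]; exact min_le_left _ _)
    have hcpos : 0 < c ∧ 0 < r := by
      rcases lt_trichotomy c 0 with h | h | h
      · rcases lt_trichotomy r 0 with h' | h' | h'
        · exact absurd ⟨h, h', hq⟩ hneg
        · simp [h'] at hcr
        · nlinarith
      · simp [h] at hcr
      · refine ⟨h, ?_⟩
        rcases lt_trichotomy r 0 with h' | h' | h'
        · nlinarith
        · simp [h'] at hcr
        · exact h'
    obtain ⟨hcp, hrp⟩ := hcpos
    have hple : p ≤ c * r := by rw [hpdef]; exact min_le_right _ _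
    -- rewrite A's loop via pvOuter_spec with C = c.toNat, R = r.toNat
    obtain ⟨C, hcC⟩ : ∃ C : Nat, c = (C : Int) := ⟨c.toNat, by omega⟩
    obtain ⟨R, hrR⟩ : ∃ R : Nat, r = (R : Int) := ⟨r.toNat, by omega⟩
    have hrange_r : PySem.List.pyRange 0 r 1 = (List.range r.toNat).map (fun j : Nat => (j : Int)) := by
      rw [PySem.List.pyRange_one]; simp
    rw [show (fun (s : List (Int × Int) × Int) (rr : Int) =>
          (PySem.List.pyRange 0 c 1).foldl (fun s c' =>
            if s.2 ≥ p then s else (s.1 ++ [(c' * px, rr * py)], s.2 + 1)) s)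
        = (fun s rr => (PySem.List.pyRange 0 c 1).foldl (pvInner px py p rr) s) from rfl]
    have hrange_r' : PySem.List.pyRange 0 r 1 = (List.range R).map (fun j : Nat => (j : Int)) := by
      rw [hrange_r, hrR]; simp
    rw [hrange_r', hcC]
    have houter := pvOuter_spec px py p C (by omega) R (le_of_lt hp)
    rw [houter]
    have hminp : min (R * C) p.toNat = p.toNat := by
      have h1 : p ≤ (R : Int) * (C : Int) := by rw [← hcC, ← hrR]; linarith [hple, mul_comm c r]
      have h2 : ((R * C : Nat) : Int) = (R : Int) * (C : Int) := by push_cast; ring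
      omega
    rw [hminp]
    -- B's side
    have hrange_p : PySem.List.pyRange 0 p 1 = (List.range p.toNat).map (fun j : Nat => (j : Int)) := by
      rw [PySem.List.pyRange_one]; simp
    rw [hrange_p, List.map_map]
    congr 1
    apply List.map_congr_left
    intro i hi
    simp only [Function.comp]
    rw [PySem.Int.mod_natCast, PySem.Int.floordiv_natCast]
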